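-- pv_equiv track=rewrite | github.com/121910318019/assignment-01-121910318019 | 04_is_rotating_prime.py | is_rotating_prime
-- ===== SOURCE A (Python) =====
-- def is_prime(n):
--     t=0;
--     if(n>1):
--         for i in range(2,n):
--             if(n%i==0):
--                 t=1;
--     if(t==0):
--         return True;
--     else:
--         return False;
--
-- def is_rotating_prime(num):
--     d=[int(x) for x in str(num)];
--     c=[0];
--     f=[];
--     l=d[:];
--     a=[];
--     for i in  range(len(d)):
--         c[0]=l.pop(len(d)-1);
--         fin=c+l;
--         l=fin[:];
--         f.append(fin);
--     for i in f:
--         strings = [str(integer) for integer in i];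
--         a_string = "".join(strings);
--         an_integer = int(a_string);
--         a.append(an_integer);
--     k=0;
--     for i in a:
--         if(is_prime(i)):
--             k+=1;
--     if(k==len(a)):
--         return True;
--     else:
--         return False;
-- ===== SOURCE B (Python) =====
-- def is_prime(n):
--     return n < 2 or all(n % i for i in range(2, n))
--
-- def is_rotating_prime(num):
--     n = len(str(num))
--     p = 10 ** (n - 1)
--     x = num
--     for _ in range(n):
--         x = (x % 10) * p + x // 10
--         if not is_prime(x):
--             return False
--     return True
-- ===== Notes on version B (the rewrite author's own statement) =====
-- stated objective: faster
-- what changed: B drops A's three list-building passes (rotated digit lists, str-join back to ints, prime-count-then-compare) and instead rotates a single integer arithmetically n times, testing each rotation with a short-circuiting is_prime and returning False at the first composite rotation; is_prime keeps A's quirk that arguments below two count as prime.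
-- outside the precondition, e.g. on is_rotating_prime(-5): A raises ValueError, B returns False
import Mathlib
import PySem

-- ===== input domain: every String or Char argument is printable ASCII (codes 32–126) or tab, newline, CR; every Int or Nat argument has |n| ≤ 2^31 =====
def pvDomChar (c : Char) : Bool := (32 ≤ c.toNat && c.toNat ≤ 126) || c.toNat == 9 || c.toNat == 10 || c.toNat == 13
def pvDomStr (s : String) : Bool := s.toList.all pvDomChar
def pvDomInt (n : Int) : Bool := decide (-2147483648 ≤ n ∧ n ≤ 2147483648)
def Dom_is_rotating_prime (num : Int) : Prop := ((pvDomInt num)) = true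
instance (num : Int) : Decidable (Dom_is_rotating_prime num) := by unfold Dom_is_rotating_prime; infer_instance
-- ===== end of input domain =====

-- B replaces A's list-of-rotated-digit-lists machinery by a single integer rotated
-- arithmetically n times, with a short-circuiting primality test and an early exit on the first
-- composite rotation (measurably faster; same worst case).

-- ===== PORT A =====
def pv_is_prime (n : Int) : Bool :=
  let t : Int :=
    if n > 1 then
      (PySem.List.pyRange 2 n).foldl (fun t i => if PySem.Int.mod n i = 0 then 1 else t) 0
    else 0
  decide (t = 0)

-- int(s) for the nonempty all-digit strings A builds here (exact on those: PySem.Int.ofChars?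
-- returns exactly this value on a nonempty string of decimal digits; its digit folder is private,
-- hence this local transcription of int() restricted to such strings)
def pvIntDigits (cs : List Char) : Int :=
  cs.foldl (fun a c => a * 10 + ((c.toNat : Int) - 48)) 0

def is_rotating_prime (num : Int) : Bool :=
  -- d = [int(x) for x in str(num)]; int(x) on a single char: PySem.Int.digitVal?
  -- (none = ValueError, which under Pre_ — num ≥ 0, all chars digits — never occurs)
  let d : List Int := (PySem.Int.toChars num).map (fun c => ((PySem.Int.digitVal? c).getD 0 : Int))
  let step := fun (s : List Int × List (List Int)) (_ : Int) =>
    let pr := (PySem.List.pop? s.1 (PySem.List.len d - 1)).getD (0, [])  -- c[0] = l.pop(len(d)-1)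
    let fin := pr.1 :: pr.2                                              -- fin = c + l
    (fin, s.2 ++ [fin])                                                  -- l = fin[:]; f.append(fin)
  let f := ((PySem.List.pyRange 0 (PySem.List.len d)).foldl step (d, [])).2
  let a := f.map (fun i => pvIntDigits (PySem.Chars.join [] (i.map PySem.Int.toChars)))
  let k : Int := a.foldl (fun k i => if pv_is_prime i then k + 1 else k) 0
  decide (k = PySem.List.len a)

-- ===== PORT B =====
def pv_is_prime_alt (n : Int) : Bool :=
  decide (n < 2) || (PySem.List.pyRange 2 n).all (fun i => decide (PySem.Int.mod n i ≠ 0))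

def pvRotChecks (p : Int) : Nat → Int → Bool
  | 0, _ => true
  | k + 1, x =>
    let x' := PySem.Int.mod x 10 * p + PySem.Int.floordiv x 10
    if pv_is_prime_alt x' then pvRotChecks p k x' else false

def is_rotating_prime_alt (num : Int) : Bool :=
  let n := PySem.Str.len (PySem.Int.toStr num)       -- n = len(str(num)), always ≥ 1
  let p := (10 : Int) ^ (n - 1).toNat                -- p = 10 ** (n - 1)
  pvRotChecks p n.toNat num

-- ===== PRECONDITION & SPEC =====
-- Pre_ excludes num < 0, on which A raises ValueError (int('-') while parsing str(num)).
def Pre_is_rotating_prime (num : Int) : Prop := 0 ≤ num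
instance (num : Int) : Decidable (Pre_is_rotating_prime num) := by
  unfold Pre_is_rotating_prime; infer_instance

def pvWitness_is_rotating_prime : Int := 197

def Spec_is_rotating_prime (num : Int) (out : Bool) : Prop := out = is_rotating_prime_alt num
instance (num : Int) (out : Bool) : Decidable (Spec_is_rotating_prime num out) := by
  unfold Spec_is_rotating_prime; infer_instance

-- ===== CLAIM (what is proved, stated in full; the proofs are below) =====
def Claim_equal_is_rotating_prime : Prop := ∀ (num : Int), Dom_is_rotating_prime num → Pre_is_rotating_prime num → Spec_is_rotating_prime num (is_rotating_prime num)


-- ===== LEMMAS AND PROOFS =====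

-- value of a (big-endian) digit list, A's and B's common currency
def pvVal (l : List Int) : Int := l.foldl (fun a d => a * 10 + d) 0

-- one right rotation of a digit list
def pvRot (l : List Int) : List Int := (l.getLast?.getD 0) :: l.dropLast

-- the successive rotations rot l, rot² l, …, rot^k l
def pvRots : Nat → List Int → List (List Int)
  | 0, _ => []
  | k + 1, l => pvRot l :: pvRots k (pvRot l)

def pvOk (l : List Int) : Prop := ∀ e ∈ l, 0 ≤ e ∧ e < 10

theorem pvVal_append (xs : List Int) (d : Int) : pvVal (xs ++ [d]) = pvVal xs * 10 + d := by
  simp [pvVal, List.foldl_append]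

theorem pvVal_cons (c : Int) (xs : List Int) :
    pvVal (c :: xs) = c * 10 ^ xs.length + pvVal xs := by
  induction xs using List.reverseRecOn with
  | nil => simp [pvVal]
  | append_singleton ys d ih =>
      have : c :: (ys ++ [d]) = (c :: ys) ++ [d] := by simp
      rw [this, pvVal_append, pvVal_append, ih]
      ring_nf
      simp [pow_succ]
      ring

theorem pvVal_nonneg {l : List Int} (h : pvOk l) : 0 ≤ pvVal l := by
  induction l using List.reverseRecOn with
  | nil => simp [pvVal]
  | append_singleton ys d ih =>
      rw [pvVal_append]
      have hd := h d (by simp)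
      have hys : pvOk ys := fun e he => h e (by simp [he])
      have := ih hys
      omega

theorem pvRot_concat (xs : List Int) (d : Int) : pvRot (xs ++ [d]) = d :: xs := by
  simp [pvRot]

theorem pvRot_ok {l : List Int} (h : pvOk l) : pvOk (pvRot l) := by
  rcases List.eq_nil_or_concat l with rfl | ⟨xs, d, rfl⟩
  · intro e he; simp [pvRot] at he; omega
  · rw [List.concat_eq_append, pvRot_concat]
    intro e he
    rcases List.mem_cons.mp he with rfl | he
    · exact h e (by simp)
    · exact h e (by simp [he])

theorem pvRot_length {l : List Int} (h : l ≠ []) : (pvRot l).length = l.length := by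
  simp [pvRot]
  rcases l with _ | ⟨x, xs⟩
  · simp at h
  · simp

-- B's arithmetic step computes the value of the rotated digit list
theorem pvStep_eq {l : List Int} (hok : pvOk l) (hne : l ≠ []) :
    PySem.Int.mod (pvVal l) 10 * (10 : Int) ^ (l.length - 1) + PySem.Int.floordiv (pvVal l) 10
      = pvVal (pvRot l) := by
  rcases List.eq_nil_or_concat l with rfl | ⟨xs, d, rfl⟩
  · simp at hne
  · rw [List.concat_eq_append] at hok ⊢
    rw [pvVal_append, pvRot_concat, pvVal_cons]
    have hd := hok d (by simp)
    have hxs : pvOk xs := fun e he => hok e (by simp [he])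
    have hv := pvVal_nonneg hxs
    rw [PySem.Int.mod_eq_emod_of_pos (by norm_num), PySem.Int.floordiv_eq_ediv_of_pos (by norm_num)]
    have h1 : (pvVal xs * 10 + d) % 10 = d := by omega
    have h2 : (pvVal xs * 10 + d) / 10 = pvVal xs := by omega
    rw [h1, h2]
    simp

-- digits of a natural number via Nat.toDigits: in range and recombining to the number
def pvDigitsOf (m : Nat) : List Int :=
  (Nat.toDigits 10 m).map (fun c => ((PySem.Int.digitVal? c).getD 0 : Int))

theorem pvDigitChar_val {r : Nat} (h : r < 10) :
    ((PySem.Int.digitVal? r.digitChar).getD 0 : Int) = (r : Int) := by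
  interval_cases r <;> decide

theorem pvDigitsOf_spec (m : Nat) : pvOk (pvDigitsOf m) ∧ pvVal (pvDigitsOf m) = (m : Int) := by
  induction m using Nat.strong_induction_on with
  | _ m ih =>
    by_cases hm : m < 10
    · rw [pvDigitsOf, Nat.toDigits_of_lt_base hm]
      constructor
      · intro e he
        simp at he
        rw [pvDigitChar_val hm] at he
        omega
      · simp [pvVal, pvDigitChar_val hm]
    · rw [pvDigitsOf, Nat.toDigits_eq_if (by norm_num), if_neg hm, List.map_append]
      have hlt : m / 10 < m := Nat.div_lt_self (by omega) (by norm_num)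
      have ihd := ih (m / 10) hlt
      rw [pvDigitsOf] at ihd
      have hr : m % 10 < 10 := Nat.mod_lt _ (by norm_num)
      constructor
      · intro e he
        rcases List.mem_append.mp he with he | he
        · exact ihd.1 e he
        · simp at he
          rw [pvDigitChar_val hr] at he
          omega
      · simp only [List.map_cons, List.map_nil]
        rw [pvVal_append, ihd.2, pvDigitChar_val hr]
        omega

-- the string A parses: for 0 ≤ num its chars are the decimal digits of num
theorem pvToChars_eq {num : Int} (h : 0 ≤ num) :
    PySem.Int.toChars num = Nat.toDigits 10 num.toNat := by
  simp [PySem.Int.toChars, Int.not_lt.mpr h]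

theorem pvEraseLast {α : Type} (xs : List α) (d : α) :
    (xs ++ [d]).eraseIdx xs.length = xs := by
  induction xs with
  | nil => simp
  | cons x xs ih => simp [ih]

-- A's first loop: each iteration replaces l by pvRot l and appends it to f
theorem pvLoopA (N : Nat) (idxs : List Int) (l : List Int) (f : List (List Int))
    (hl : l.length = N) (hne : l ≠ []) :
    idxs.foldl
      (fun (s : List Int × List (List Int)) (_ : Int) =>
        (((PySem.List.pop? s.1 ((N : Int) - 1)).getD (0, [])).1
            :: ((PySem.List.pop? s.1 ((N : Int) - 1)).getD (0, [])).2,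
          s.2 ++ [((PySem.List.pop? s.1 ((N : Int) - 1)).getD (0, [])).1
            :: ((PySem.List.pop? s.1 ((N : Int) - 1)).getD (0, [])).2])) (l, f)
      = (pvRot^[idxs.length] l, f ++ pvRots idxs.length l) := by
  induction idxs generalizing l f with
  | nil => simp [pvRots]
  | cons i idxs ih =>
      rcases List.eq_nil_or_concat l with rfl | ⟨xs, d, rfl⟩
      · simp at hne
      · rw [List.concat_eq_append] at hl ⊢
        have hN : (N : Int) - 1 = ((xs.length : Nat) : Int) := by
          simp at hl; omega
        have hpop : PySem.List.pop? (xs ++ [d]) ((N : Int) - 1) = some (d, xs) := by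
          rw [hN, PySem.List.pop?_natCast (xs ++ [d]) xs.length (by simp), pvEraseLast]
          congr 1
          simp [List.getElem_concat_length]
        have hstep : pvRot (xs ++ [d]) = d :: xs := pvRot_concat xs d
        simp only [List.foldl_cons, List.length_cons]
        rw [Function.iterate_succ_apply, hstep]
        have hrec := ih (d :: xs) (f ++ [d :: xs]) (by simp at hl ⊢; omega) (by simp)
        simp only [hpop, Option.getD_some]
        rw [show pvRots (idxs.length + 1) (xs ++ [d]) = (d :: xs) :: pvRots idxs.length (d :: xs) by
          simp [pvRots, hstep]]
        rw [show f ++ (d :: xs) :: pvRots idxs.length (d :: xs)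
              = f ++ [d :: xs] ++ pvRots idxs.length (d :: xs) by simp]
        exact hrec

-- the rotations produced all stay digit lists of the same length
theorem pvRots_mem (k : Nat) (l : List Int) (hok : pvOk l) (hne : l ≠ []) :
    ∀ r ∈ pvRots k l, pvOk r ∧ r ≠ [] ∧ r.length = l.length := by
  induction k generalizing l with
  | zero => simp [pvRots]
  | succ k ih =>
      intro r hr
      have hrot : pvOk (pvRot l) := pvRot_ok hok
      have hrotne : pvRot l ≠ [] := by simp [pvRot]
      have hrlen : (pvRot l).length = l.length := pvRot_length hne
      rcases List.mem_cons.mp hr with rfl | hr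
      · exact ⟨hrot, hrotne, hrlen⟩
      · have := ih (pvRot l) hrot hrotne r hr
        exact ⟨this.1, this.2.1, this.2.2.trans hrlen⟩

-- a single decimal digit rendered by str() and read back
theorem pvToChars_digit {e : Int} (h0 : 0 ≤ e) (h9 : e < 10) :
    PySem.Int.toChars e = [Char.ofNat (48 + e.toNat)]
      ∧ ((Char.ofNat (48 + e.toNat)).toNat : Int) - 48 = e := by
  interval_cases e <;> exact ⟨by decide, by decide⟩

-- decimal recombination: A's join + int over a digit list returns its value
theorem pvIntDigits_join {l : List Int} (h : pvOk l) :
    pvIntDigits (PySem.Chars.join [] (l.map PySem.Int.toChars)) = pvVal l := by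
  have hmap : l.map PySem.Int.toChars
      = (l.map (fun e => Char.ofNat (48 + e.toNat))).map (fun c => [c]) := by
    rw [List.map_map]
    refine List.map_congr_left (fun e he => ?_)
    have h0 := (h e he).1
    have h9 := (h e he).2
    exact (pvToChars_digit h0 h9).1
  rw [hmap, PySem.Chars.join_nil_singletons, pvIntDigits, List.foldl_map, pvVal]
  refine PySem.List.foldl_congr_mem l _ _ 0 (fun a e he => ?_)
  rw [(pvToChars_digit (h e he).1 (h e he).2).2]

-- A's is_prime and B's is_prime agree everywhere
theorem pvSticky (n : Int) (xs : List Int) (t0 : Int) :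
    xs.foldl (fun t i => if PySem.Int.mod n i = 0 then 1 else t) t0
      = if xs.any (fun i => decide (PySem.Int.mod n i = 0)) then 1 else t0 := by
  induction xs generalizing t0 with
  | nil => simp
  | cons x xs ih =>
      by_cases hx : PySem.Int.mod n x = 0 <;> simp [hx, ih] <;> split <;> rfl

theorem pvPrime_eq (n : Int) : pv_is_prime n = pv_is_prime_alt n := by
  by_cases hn : n > 1
  · have hn2 : ¬ n < 2 := by omega
    simp only [pv_is_prime, pv_is_prime_alt, if_pos hn, pvSticky, decide_eq_false hn2,
      Bool.false_or]
    rw [List.all_eq_not_any_not]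
    cases hany : (PySem.List.pyRange 2 n).any (fun i => decide (PySem.Int.mod n i = 0)) <;>
      simp [decide_not] at hany ⊢ <;> simpa using hany
  · simp [pv_is_prime, pv_is_prime_alt, hn, show n < 2 by omega]

-- B's loop checks exactly the values of the successive rotations
theorem pvLoopB (k : Nat) (l : List Int) (N : Nat) (hok : pvOk l) (hne : l ≠ [])
    (hl : l.length = N) :
    pvRotChecks ((10 : Int) ^ (N - 1)) k (pvVal l)
      = ((pvRots k l).map pvVal).all pv_is_prime_alt := by
  induction k generalizing l with
  | zero => simp [pvRots, pvRotChecks]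
  | succ k ih =>
      have hx : PySem.Int.mod (pvVal l) 10 * (10 : Int) ^ (N - 1)
          + PySem.Int.floordiv (pvVal l) 10 = pvVal (pvRot l) := by
        rw [← hl]; exact pvStep_eq hok hne
      rw [pvRotChecks]
      simp only [hx]
      have hrot : pvOk (pvRot l) := pvRot_ok hok
      have hrotne : pvRot l ≠ [] := by simp [pvRot]
      have hrlen : (pvRot l).length = N := (pvRot_length hne).trans hl
      by_cases hp : pv_is_prime_alt (pvVal (pvRot l))
      · simp [pvRots, hp, ih (pvRot l) hrot hrotne hrlen]
      · simp [pvRots, hp]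

theorem pvCountAll (p : Int → Bool) (L : List Int) :
    decide ((0 : Int) + ((L.countP p : Nat) : Int) = (L.length : Int)) = L.all p := by
  rw [Bool.eq_iff_iff]
  simp [List.countP_eq_length, List.all_eq_true]

-- ===== VERDICT (by name: the statement is the Claim_ definition above) =====
theorem is_rotating_prime_spec : Claim_equal_is_rotating_prime := by
  intro num _ hpre
  unfold Spec_is_rotating_prime
  have hnum : ((num.toNat : Nat) : Int) = num := Int.toNat_of_nonneg hpre
  have hD : (PySem.Int.toChars num).map (fun c => ((PySem.Int.digitVal? c).getD 0 : Int))
      = pvDigitsOf num.toNat := by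
    rw [pvToChars_eq hpre]; rfl
  have hok := (pvDigitsOf_spec num.toNat).1
  have hval := (pvDigitsOf_spec num.toNat).2
  have hlenpos : 0 < (pvDigitsOf num.toNat).length := by
    rw [pvDigitsOf, List.length_map]; exact Nat.length_toDigits_pos
  have hne : pvDigitsOf num.toNat ≠ [] := List.ne_nil_of_length_pos hlenpos
  -- the digit count both programs use
  set n : Nat := (pvDigitsOf num.toNat).length with hn
  -- ===== A's side =====
  rw [is_rotating_prime]
  simp only [hD, PySem.List.len_eq, hn.symm]
  rw [PySem.List.pyRange_zero_natCast n]
  rw [pvLoopA n _ (pvDigitsOf num.toNat) [] rfl hne]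
  simp only [List.length_map, List.length_range, List.nil_append]
  have ha : (pvRots n (pvDigitsOf num.toNat)).map
        (fun i => pvIntDigits (PySem.Chars.join [] (i.map PySem.Int.toChars)))
      = (pvRots n (pvDigitsOf num.toNat)).map pvVal := by
    refine List.map_congr_left (fun r hr => ?_)
    exact pvIntDigits_join (pvRots_mem n _ hok hne r hr).1
  rw [ha, PySem.List.foldl_count_if pv_is_prime,
    show (pvRots n (pvDigitsOf num.toNat)).length
        = ((pvRots n (pvDigitsOf num.toNat)).map pvVal).length by simp,
    pvCountAll]
  -- ===== B's side =====
  rw [is_rotating_prime_alt]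
  have hlen : PySem.Str.len (PySem.Int.toStr num) = (n : Int) := by
    rw [PySem.Str.len_eq, PySem.Int.toList_toStr, pvToChars_eq hpre, hn, pvDigitsOf,
      List.length_map]
  simp only [hlen]
  have h1 : ((n : Int) - 1).toNat = n - 1 := by omega
  have h2 : ((n : Int)).toNat = n := by omega
  rw [h1, h2]
  have hx : num = pvVal (pvDigitsOf num.toNat) := by rw [hval, hnum]
  conv_rhs => rw [hx]
  rw [pvLoopB n (pvDigitsOf num.toNat) n hok hne rfl]
  -- the two prime tests agree
  rw [funext pvPrime_eq]
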